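-- pv_equiv track=rewrite | github.com/zacheen/python | question_practice/leetcode/question_type/12_DP/_DP _P_House Robber/_1_198. House Robber (include path solution)/A.py | rob_path
-- ===== SOURCE A (Python) =====
-- from typing import List
--
-- def rob_path(nums: List[int]) -> int:
--     interval = 2
--     dp = [0]*interval
--     choice = []
--     for n in nums :
--         # take this house
--         take = n + dp[-interval]
--
--         # don't take this house
--         dont_take = dp[-1]
--
--         if take > dont_take :
--             dp.append(take)
--             choice.append(True)
--         else :
--             dp.append(dont_take)
--             choice.append(False)
--
--     # if there is a increase, it means that we picked this one
--     now_i = len(choice)-1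
--     path = []
--     while now_i >= 0:
--         if choice[now_i] :
--             path.append(now_i)
--             now_i -= interval
--         else:
--             now_i -= 1
--
--     if sum(nums[indx] for indx in path) != dp[-1]:
--         raise Exception
--     return dp[-1], path
-- ===== SOURCE B (Python) =====
-- from typing import List
--
-- def rob_path(nums: List[int]) -> int:
--     # One forward pass carrying, for each of the two rolling optima, the actual
--     # chosen-index chain (a cons cell (index, parent)); no choice array and no
--     # backward reconstruction. The chain head is the largest index, so reading
--     # it out front-to-back yields the path in descending order directly.
--     prev2 = (0, None)   # best (value, chain) up to two houses back
--     prev = (0, None)    # best (value, chain) up to the previous house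
--     for i, n in enumerate(nums):
--         take = n + prev2[0]
--         if take > prev[0]:
--             cur = (take, (i, prev2[1]))
--         else:
--             cur = prev
--         prev2, prev = prev, cur
--     value, chain = prev
--     path = []
--     while chain is not None:
--         path.append(chain[0])
--         chain = chain[1]
--     return value, path
-- ===== Notes on version B (the rewrite author's own statement) =====
-- stated objective: alternative
-- what changed: A builds a dp-value array plus a parallel choice array, reconstructs the path by a backward walk over the choices, and re-verifies the path sum; B makes one forward pass carrying, for the two rolling optima, the chosen-index chains themselves (cons cells), so the choice array, the backward reconstruction and the checksum pass all disappear.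
import Mathlib
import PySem

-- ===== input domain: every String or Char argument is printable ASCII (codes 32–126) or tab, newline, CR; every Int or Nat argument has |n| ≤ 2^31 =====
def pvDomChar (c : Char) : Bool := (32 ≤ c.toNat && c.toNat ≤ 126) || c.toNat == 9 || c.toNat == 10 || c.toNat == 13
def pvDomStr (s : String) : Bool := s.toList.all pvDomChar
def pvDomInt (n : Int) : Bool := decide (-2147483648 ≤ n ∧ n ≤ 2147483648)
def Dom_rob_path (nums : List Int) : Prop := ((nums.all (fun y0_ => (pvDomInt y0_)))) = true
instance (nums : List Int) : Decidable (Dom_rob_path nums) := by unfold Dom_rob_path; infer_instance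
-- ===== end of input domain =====

-- B replaces A's dp+choice arrays and backward path reconstruction by a single forward
-- pass that carries the chosen-index chains themselves (objective: alternative).

-- ===== PORT A =====
-- one iteration of A's 'for n in nums' loop over (dp, choice)
def robAStep (st : List Int × List Bool) (n : Int) : List Int × List Bool :=
  let take := n + (PySem.List.pyGet? st.1 (-2)).getD 0  -- dp[-interval]; dp always has ≥ 2 entries, so in range
  let dont := (PySem.List.pyGet? st.1 (-1)).getD 0      -- dp[-1]
  if take > dont then (st.1 ++ [take], st.2 ++ [true])
  else (st.1 ++ [dont], st.2 ++ [false])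

-- A's 'while now_i >= 0' reconstruction loop (path.append builds the list head-first here
-- because Python appends the current, largest, index first)
def robAWalk (choice : List Bool) (i : Int) : List Int :=
  if h : 0 ≤ i then
    if (PySem.List.pyGet? choice i).getD false then i :: robAWalk choice (i - 2)
    else robAWalk choice (i - 1)
  else []
termination_by (i + 1).toNat
decreasing_by all_goals omega

def rob_path (nums : List Int) : Int × List Int :=
  let st := nums.foldl robAStep ([0, 0], [])
  let path := robAWalk st.2 ((st.2.length : Int) - 1)
  let last := (PySem.List.pyGet? st.1 (-1)).getD 0
  -- Python's final consistency check: on mismatch it raises Exception; the check never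
  -- fails (robA_inv below), so this branch is unreachable and its value immaterial.
  if (path.map (fun j => (PySem.List.pyGet? nums j).getD 0)).sum ≠ last then (0, [])
  else (last, path)

-- ===== PORT B =====
-- one iteration of B's loop over ((value, chain) two back, (value, chain) previous);
-- a chain 'None | (i, parent)' is the list of chosen indices, head = largest index
def robBStep (st : (Int × List Int) × (Int × List Int)) (p : Int × Int) :
    (Int × List Int) × (Int × List Int) :=
  let take := p.2 + st.1.1
  if take > st.2.1 then (st.2, (take, p.1 :: st.1.2))
  else (st.2, st.2)

-- B's final 'while chain is not None' read-out loop (head-first, so descending order)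
def robBChainOut : List Int → List Int
  | [] => []
  | j :: t => j :: robBChainOut t

def rob_path_alt (nums : List Int) : Int × List Int :=
  let st := (PySem.List.enumerate nums 0).foldl robBStep ((0, []), (0, []))
  (st.2.1, robBChainOut st.2.2)

-- ===== PRECONDITION & SPEC =====
def Spec_rob_path (nums : List Int) (out : Int × List Int) : Prop := out = rob_path_alt nums
instance (nums : List Int) (out : Int × List Int) : Decidable (Spec_rob_path nums out) := by unfold Spec_rob_path; infer_instance

-- ===== CLAIM (what is proved, stated in full; the proofs are below) =====
def Claim_equal_rob_path : Prop := ∀ (nums : List Int), Dom_rob_path nums → Spec_rob_path nums (rob_path nums)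

-- ===== LEMMAS AND PROOFS =====

theorem robBChainOut_id (l : List Int) : robBChainOut l = l := by
  induction l with
  | nil => rfl
  | cons x t ih => simp [robBChainOut, ih]

theorem robAWalk_neg (c : List Bool) (i : Int) (h : i < 0) : robAWalk c i = [] := by
  rw [robAWalk]
  simp [not_le.mpr h]

-- the reconstruction walk only reads choice entries at indices ≤ its start index
theorem robAWalk_append_aux (c : List Bool) (b : Bool) :
    ∀ (k : Nat) (i : Int), (i + 1).toNat ≤ k → i < (c.length : Int) →
      robAWalk (c ++ [b]) i = robAWalk c i := by
  intro k
  induction k with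
  | zero =>
    intro i hk _
    have hi : i < 0 := by omega
    rw [robAWalk_neg _ _ hi, robAWalk_neg _ _ hi]
  | succ k ih =>
    intro i hk hlt
    by_cases hi : 0 ≤ i
    · have hget : PySem.List.pyGet? (c ++ [b]) i = PySem.List.pyGet? c i := by
        rw [PySem.List.pyGet?_of_nonneg _ hi, PySem.List.pyGet?_of_nonneg _ hi]
        have : i.toNat < c.length := by omega
        simp [List.getElem?_append_left this]
      conv_lhs => rw [robAWalk]
      conv_rhs => rw [robAWalk]
      rw [dif_pos hi, dif_pos hi, hget]
      rw [ih (i - 2) (by omega) (by omega), ih (i - 1) (by omega) (by omega)]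
    · rw [robAWalk_neg _ _ (by omega), robAWalk_neg _ _ (by omega)]

theorem robAWalk_append (c : List Bool) (b : Bool) (i : Int) (hlt : i < (c.length : Int)) :
    robAWalk (c ++ [b]) i = robAWalk c i :=
  robAWalk_append_aux c b (i + 1).toNat i (le_refl _) hlt

-- pyGet? at a nonnegative in-range index is unchanged by appending on the right
theorem pyGet?_append_singleton_left (ns : List Int) (n : Int) (j : Int)
    (h0 : 0 ≤ j) (hlt : j < (ns.length : Int)) :
    PySem.List.pyGet? (ns ++ [n]) j = PySem.List.pyGet? ns j := by
  rw [PySem.List.pyGet?_of_nonneg _ h0, PySem.List.pyGet?_of_nonneg _ h0]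
  have : j.toNat < ns.length := by omega
  simp [List.getElem?_append_left this]

-- the joint invariant of A's forward loop and B's forward loop
theorem robA_inv (ns : List Int) :
    (ns.foldl robAStep ([0, 0], [])).2.length = ns.length
    ∧ (∃ d₀, (ns.foldl robAStep ([0, 0], [])).1 =
        d₀ ++ [((PySem.List.enumerate ns 0).foldl robBStep ((0, []), (0, []))).1.1,
               ((PySem.List.enumerate ns 0).foldl robBStep ((0, []), (0, []))).2.1])
    ∧ robAWalk (ns.foldl robAStep ([0, 0], [])).2 ((ns.length : Int) - 1) =
        ((PySem.List.enumerate ns 0).foldl robBStep ((0, []), (0, []))).2.2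
    ∧ robAWalk (ns.foldl robAStep ([0, 0], [])).2 ((ns.length : Int) - 2) =
        ((PySem.List.enumerate ns 0).foldl robBStep ((0, []), (0, []))).1.2
    ∧ (∀ j ∈ ((PySem.List.enumerate ns 0).foldl robBStep ((0, []), (0, []))).2.2,
        0 ≤ j ∧ j < (ns.length : Int))
    ∧ (∀ j ∈ ((PySem.List.enumerate ns 0).foldl robBStep ((0, []), (0, []))).1.2,
        0 ≤ j ∧ j < (ns.length : Int))
    ∧ ((((PySem.List.enumerate ns 0).foldl robBStep ((0, []), (0, []))).2.2.map
          (fun j => (PySem.List.pyGet? ns j).getD 0)).sum =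
        ((PySem.List.enumerate ns 0).foldl robBStep ((0, []), (0, []))).2.1)
    ∧ ((((PySem.List.enumerate ns 0).foldl robBStep ((0, []), (0, []))).1.2.map
          (fun j => (PySem.List.pyGet? ns j).getD 0)).sum =
        ((PySem.List.enumerate ns 0).foldl robBStep ((0, []), (0, []))).1.1) := by
  induction ns using List.reverseRecOn with
  | nil =>
    refine ⟨rfl, ⟨[], rfl⟩, ?_, ?_, by simp [PySem.List.enumerate],
      by simp [PySem.List.enumerate], by simp [PySem.List.enumerate],
      by simp [PySem.List.enumerate]⟩
    · rw [robAWalk_neg] <;> simp [PySem.List.enumerate]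
    · rw [robAWalk_neg] <;> simp [PySem.List.enumerate]
  | append_singleton ns n ih =>
    obtain ⟨hlen, ⟨d₀, hdp⟩, hw1, hw2, hb2, hb1, hs2, hs1⟩ := ih
    -- abbreviations for the states before the last step
    set A := ns.foldl robAStep ([0, 0], []) with hA
    set B := (PySem.List.enumerate ns 0).foldl robBStep ((0, []), (0, [])) with hB
    have hfoldA : (ns ++ [n]).foldl robAStep ([0, 0], []) = robAStep A n := by
      rw [List.foldl_append]; rfl
    have henum : PySem.List.enumerate (ns ++ [n]) 0 =
        PySem.List.enumerate ns 0 ++ [((ns.length : Int), n)] := by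
      rw [PySem.List.enumerate_append]
      simp [PySem.List.enumerate]
    have hfoldB : (PySem.List.enumerate (ns ++ [n]) 0).foldl robBStep ((0, []), (0, [])) =
        robBStep B ((ns.length : Int), n) := by
      rw [henum, List.foldl_append]; rfl
    -- dp[-1] and dp[-2] of A's dp list
    have hget1 : (PySem.List.pyGet? A.1 (-1)).getD 0 = B.2.1 := by
      rw [hdp, PySem.List.pyGet?_neg_one]
      simp
    have hget2 : (PySem.List.pyGet? A.1 (-2)).getD 0 = B.1.1 := by
      rw [hdp]
      rw [PySem.List.pyGet?_neg_ofNat _ 2 (by omega) (by simp)]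
      have h2 : (d₀ ++ [B.1.1, B.2.1]).length - 2 = d₀.length := by simp
      rw [h2]
      rw [List.getElem?_append_right (le_refl _)]
      simp
    have hstep : robAStep A n = (if n + B.1.1 > B.2.1
        then (A.1 ++ [n + B.1.1], A.2 ++ [true]) else (A.1 ++ [B.2.1], A.2 ++ [false])) := by
      simp only [robAStep, hget1, hget2]
    -- pyGet? over ns ++ [n] agrees with pyGet? over ns on the carried indices
    have hmap2 : B.2.2.map (fun j => (PySem.List.pyGet? (ns ++ [n]) j).getD 0) =
        B.2.2.map (fun j => (PySem.List.pyGet? ns j).getD 0) := by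
      apply List.map_congr_left
      intro j hj
      rw [pyGet?_append_singleton_left ns n j (hb2 j hj).1 (hb2 j hj).2]
    have hmap1 : B.1.2.map (fun j => (PySem.List.pyGet? (ns ++ [n]) j).getD 0) =
        B.1.2.map (fun j => (PySem.List.pyGet? ns j).getD 0) := by
      apply List.map_congr_left
      intro j hj
      rw [pyGet?_append_singleton_left ns n j (hb1 j hj).1 (hb1 j hj).2]
    have hlen' : ((ns ++ [n]).length : Int) = (ns.length : Int) + 1 := by simp
    by_cases hc : n + B.1.1 > B.2.1
    · -- the new house is taken
      have hA' : (ns ++ [n]).foldl robAStep ([0, 0], []) = (A.1 ++ [n + B.1.1], A.2 ++ [true]) := by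
        rw [hfoldA, hstep, if_pos hc]
      have hB' : (PySem.List.enumerate (ns ++ [n]) 0).foldl robBStep ((0, []), (0, [])) =
          (B.2, (n + B.1.1, (ns.length : Int) :: B.1.2)) := by
        rw [hfoldB]
        simp only [robBStep, if_pos hc]
      have hgetc : (PySem.List.pyGet? (A.2 ++ [true]) ((ns.length : Int))).getD false = true := by
        have : ((ns.length : Int)) = ((A.2.length : Nat) : Int) := by rw [hlen]
        rw [this, PySem.List.pyGet?_append_length]
        rfl
      have hwalktop : robAWalk (A.2 ++ [true]) ((ns.length : Int)) =
          (ns.length : Int) :: B.1.2 := by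
        conv_lhs => rw [robAWalk]
        rw [dif_pos (Int.natCast_nonneg ns.length), hgetc, if_pos rfl]
        rw [robAWalk_append A.2 true _ (by rw [hlen]; omega), hw2]
      refine ⟨?_, ⟨d₀ ++ [B.1.1], ?_⟩, ?_, ?_, ?_, ?_, ?_, ?_⟩
      · rw [hA']; simp [hlen]
      · rw [hA', hB', hdp]; simp
      · rw [hA', hB', hlen']
        simpa using hwalktop
      · rw [hA', hB', hlen']
        have : (ns.length : Int) + 1 - 2 = (ns.length : Int) - 1 := by omega
        rw [this, robAWalk_append A.2 true _ (by rw [hlen]; omega), hw1]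
      · rw [hB', hlen']
        intro j hj
        rcases List.mem_cons.mp hj with h | h
        · omega
        · have := hb1 j h; omega
      · rw [hB', hlen']
        intro j hj
        have := hb2 j hj; omega
      · rw [hB']
        simp only [List.map_cons, List.sum_cons, hmap1, hs1]
        have : (PySem.List.pyGet? (ns ++ [n]) ((ns.length : Int))).getD 0 = n := by
          have h0 : ((ns.length : Nat) : Int) = (ns.length : Int) := rfl
          rw [← h0, PySem.List.pyGet?_append_length]
          rfl
        rw [this]
      · rw [hB']
        simp only [hmap2, hs2]
    · -- the new house is not taken
      have hA' : (ns ++ [n]).foldl robAStep ([0, 0], []) = (A.1 ++ [B.2.1], A.2 ++ [false]) := by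
        rw [hfoldA, hstep, if_neg hc]
      have hB' : (PySem.List.enumerate (ns ++ [n]) 0).foldl robBStep ((0, []), (0, [])) =
          (B.2, B.2) := by
        rw [hfoldB]
        simp only [robBStep, if_neg hc]
      have hgetc : (PySem.List.pyGet? (A.2 ++ [false]) ((ns.length : Int))).getD false = false := by
        have : ((ns.length : Int)) = ((A.2.length : Nat) : Int) := by rw [hlen]
        rw [this, PySem.List.pyGet?_append_length]
        rfl
      have hwalktop : robAWalk (A.2 ++ [false]) ((ns.length : Int)) = B.2.2 := by
        conv_lhs => rw [robAWalk]
        rw [dif_pos (Int.natCast_nonneg ns.length), hgetc, if_neg (by simp)]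
        rw [robAWalk_append A.2 false _ (by rw [hlen]; omega), hw1]
      refine ⟨?_, ⟨d₀ ++ [B.1.1], ?_⟩, ?_, ?_, ?_, ?_, ?_, ?_⟩
      · rw [hA']; simp [hlen]
      · rw [hA', hB', hdp]; simp
      · rw [hA', hB', hlen']
        simpa using hwalktop
      · rw [hA', hB', hlen']
        have : (ns.length : Int) + 1 - 2 = (ns.length : Int) - 1 := by omega
        rw [this, robAWalk_append A.2 false _ (by rw [hlen]; omega), hw1]
      · rw [hB', hlen']
        intro j hj
        have := hb2 j hj; omega
      · rw [hB', hlen']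
        intro j hj
        have := hb2 j hj; omega
      · rw [hB']
        simp only [hmap2, hs2]
      · rw [hB']
        simp only [hmap2, hs2]

-- ===== VERDICT (by name: the statement is the Claim_ definition above) =====
theorem rob_path_spec : Claim_equal_rob_path := by
  intro nums _
  unfold Spec_rob_path
  obtain ⟨hlen, ⟨d₀, hdp⟩, hw1, _, _, _, hs2, _⟩ := robA_inv nums
  unfold rob_path rob_path_alt
  set A := nums.foldl robAStep ([0, 0], []) with hA
  set B := (PySem.List.enumerate nums 0).foldl robBStep ((0, []), (0, [])) with hB
  have hget1 : (PySem.List.pyGet? A.1 (-1)).getD 0 = B.2.1 := by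
    rw [hdp, PySem.List.pyGet?_neg_one]
    simp
  have hpath : robAWalk A.2 ((A.2.length : Int) - 1) = B.2.2 := by
    rw [hlen]; exact hw1
  simp only [hpath, hget1, hs2, ne_eq, not_true_eq_false, if_false, robBChainOut_id]
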